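-- pv_equiv track=rewrite | github.com/alexandru-cohal/AdventOfCode2024 | day5.py | part1part2
-- ===== SOURCE A (Python) =====
-- def fixUpdate(ruleList, update):
--     updateOrdered = False
--
--     while not updateOrdered:
--         updateOrdered = True
--
--         for rule in ruleList:
--             try:
--                 idxLeft = update.index(rule[0])
--                 idxRight = update.index(rule[1])
--             except:
--                 continue
--             else:
--                 if idxLeft > idxRight:
--                     updateOrdered = False
--                     update[idxLeft], update[idxRight] = update[idxRight], update[idxLeft]
--                     break
--
--     return update
--
-- def part1part2(ruleList, updateList):
--     sumMidUpdateOrdered = 0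
--     sumMidUpdateFixed = 0
--
--     for update in updateList:
--         updateOrdered = True
--
--         for rule in ruleList:
--             try:
--                 idxLeft = update.index(rule[0])
--                 idxRight = update.index(rule[1])
--             except:
--                 continue
--             else:
--                 if idxLeft > idxRight:
--                     update = fixUpdate(ruleList, update)
--                     updateOrdered = False
--                     break
--         if updateOrdered:
--             sumMidUpdateOrdered += update[int((len(update) - 1) / 2)]
--         else:
--             sumMidUpdateFixed += update[int((len(update) - 1) / 2)]
--
--     return sumMidUpdateOrdered, sumMidUpdateFixed
-- ===== SOURCE B (Python) =====
-- def part1part2(ruleList, updateList):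
--     rules = set(ruleList)
--     sumMidUpdateOrdered = 0
--     sumMidUpdateFixed = 0
--
--     for update in updateList:
--         pos = {}
--         for i, x in enumerate(update):
--             if x not in pos:
--                 pos[x] = i
--         mid = (len(update) - 1) // 2
--
--         if all(not (a in pos and b in pos and pos[a] > pos[b]) for (a, b) in ruleList):
--             sumMidUpdateOrdered += update[mid]
--         else:
--             for x in update:
--                 if sum((y, x) in rules for y in update) == mid:
--                     sumMidUpdateFixed += x
--                     break
--
--     return sumMidUpdateOrdered, sumMidUpdateFixed
-- ===== Notes on version B (the rewrite author's own statement) =====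
-- stated objective: faster
-- what changed: B precomputes a hash-set of the rule pairs and a first-position dict per update, so the ordered check is one O(R) pass, and instead of bubble-repairing an unordered update it finds the fixed middle directly as the unique element preceded by exactly (n-1)//2 of the update's elements under the rules.
-- outside the precondition, e.g. on part1part2([(2, 1)], [[1, 3, 2]]): A returns (0, 3), B returns (0, 1)
import Mathlib
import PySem

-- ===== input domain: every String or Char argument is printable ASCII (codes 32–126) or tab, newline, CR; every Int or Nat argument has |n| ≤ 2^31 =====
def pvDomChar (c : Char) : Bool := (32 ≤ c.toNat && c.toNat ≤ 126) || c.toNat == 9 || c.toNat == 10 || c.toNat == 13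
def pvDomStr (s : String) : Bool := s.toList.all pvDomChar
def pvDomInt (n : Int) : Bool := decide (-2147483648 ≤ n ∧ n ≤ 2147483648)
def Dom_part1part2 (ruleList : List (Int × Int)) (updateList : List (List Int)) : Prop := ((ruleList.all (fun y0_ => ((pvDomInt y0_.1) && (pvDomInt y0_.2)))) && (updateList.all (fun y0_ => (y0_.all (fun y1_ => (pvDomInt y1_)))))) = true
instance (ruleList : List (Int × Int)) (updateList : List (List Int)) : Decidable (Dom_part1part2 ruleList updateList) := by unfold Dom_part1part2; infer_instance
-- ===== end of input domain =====

-- B replaces A's repeated list.index scans and bubble-repair loop by a rule-pair set, a first-position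
-- dict per update (one O(R) ordered check) and a direct rank computation of the fixed middle element.
-- NOTE on side effects: Python A sorts unordered inner lists of updateList IN PLACE; the equivalence
-- proved here is about the RETURN value only (B does not mutate its arguments).

-- ===== PORT A =====
-- scan of A's inner `for rule in ruleList` loop: first rule whose two indices are out of order
def pvFindViol (update : List Int) : List (Int × Int) → Option (Nat × Nat)
  | [] => none
  | r :: rest =>
    match PySem.List.index? update r.1, PySem.List.index? update r.2 with
    | some iL, some iR => if iR < iL then some (iL, iR) else pvFindViol update rest
    | _, _ => pvFindViol update rest

-- update[idxLeft], update[idxRight] = update[idxRight], update[idxLeft]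
def pvSwap (u : List Int) (iL iR : Nat) : List Int :=
  (u.set iL (u.getD iR 0)).set iR (u.getD iL 0)

-- A's `while not updateOrdered` loop in fixUpdate; the fuel only makes the recursion total
-- (under Pre_ the loop performs at most one swap per inversion, fewer than the fuel supplied)
def pvFixLoop (ruleList : List (Int × Int)) : Nat → List Int → List Int
  | 0, u => u
  | f + 1, u =>
    match pvFindViol u ruleList with
    | none => u
    | some (iL, iR) => pvFixLoop ruleList f (pvSwap u iL iR)

-- update[int((len(update) - 1) / 2)]  (true division, then int() truncation)
def pvMidA (u : List Int) : Int :=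
  PySem.List.pyGetD u (PySem.Int.truncdiv ((u.length : Int) - 1) 2) 0

def part1part2 (ruleList : List (Int × Int)) (updateList : List (List Int)) : Int × Int :=
  updateList.foldl
    (fun acc update =>
      match pvFindViol update ruleList with
      | none => (acc.1 + pvMidA update, acc.2)
      | some _ =>
        let fixed := pvFixLoop ruleList (update.length * update.length + 1) update
        (acc.1, acc.2 + pvMidA fixed))
    (0, 0)

-- ===== PORT B =====
-- pos = {}; for i, x in enumerate(update): if x not in pos: pos[x] = i
def pvPosDict (u : List Int) : PySem.Dict Int Int :=
  (PySem.List.enumerate u 0).foldl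
    (fun d p => if d.contains p.2 then d else d.insert p.2 p.1) PySem.Dict.empty

-- all(not (a in pos and b in pos and pos[a] > pos[b]) for (a, b) in ruleList)
def pvOrderedB (ruleList : List (Int × Int)) (pos : PySem.Dict Int Int) : Bool :=
  ruleList.all (fun r =>
    !(pos.contains r.1 && pos.contains r.2 && decide (pos.getD r.2 0 < pos.getD r.1 0)))

-- for x in update: if sum((y, x) in rules for y in update) == mid: s2 += x; break
def pvRankPick (rules : PySem.Set (Int × Int)) (u : List Int) (mid : Int) :
    List Int → Int → Int
  | [], s2 => s2
  | x :: rest, s2 =>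
    if ((u.countP (fun y => PySem.Set.contains rules (y, x)) : Int) = mid) then s2 + x
    else pvRankPick rules u mid rest s2

def part1part2_alt (ruleList : List (Int × Int)) (updateList : List (List Int)) : Int × Int :=
  let rules := PySem.Set.ofList ruleList
  updateList.foldl
    (fun acc update =>
      let pos := pvPosDict update
      let mid : Int := PySem.Int.floordiv ((update.length : Int) - 1) 2
      if pvOrderedB ruleList pos then
        (acc.1 + PySem.List.pyGetD update mid 0, acc.2)
      else
        (acc.1, pvRankPick rules update mid update acc.2))
    (0, 0)

-- ===== PRECONDITION & SPEC =====
-- the update has no out-of-order pair of first occurrences under any rule (A's "ordered" test)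
abbrev pvOrdered (ruleList : List (Int × Int)) (u : List Int) : Prop :=
  ∀ r ∈ ruleList, r.1 ∈ u → r.2 ∈ u →
    (PySem.List.index? u r.1).getD 0 ≤ (PySem.List.index? u r.2).getD 0

-- the rules restrict to a strict total order on the update's (distinct) elements
abbrev pvSTO (ruleList : List (Int × Int)) (u : List Int) : Prop :=
  u.Nodup ∧
  (∀ x ∈ u, (x, x) ∉ ruleList) ∧
  (∀ x ∈ u, ∀ y ∈ u, x ≠ y → (x, y) ∈ ruleList ∨ (y, x) ∈ ruleList) ∧
  (∀ x ∈ u, ∀ y ∈ u, (x, y) ∈ ruleList → (y, x) ∉ ruleList) ∧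
  (∀ x ∈ u, ∀ y ∈ u, ∀ z ∈ u, (x, y) ∈ ruleList → (y, z) ∈ ruleList → (x, z) ∈ ruleList)

-- Pre_ excludes empty updates (A raises IndexError) and updates that are out of order but whose
-- elements the rules do not linearly order: there A's repaired order — hence its middle element —
-- is an accident of its swap sequence (and on cyclic rules A's repair loop does not terminate).
def Pre_part1part2 (ruleList : List (Int × Int)) (updateList : List (List Int)) : Prop :=
  ∀ u ∈ updateList, u ≠ [] ∧ (pvOrdered ruleList u ∨ pvSTO ruleList u)
instance (ruleList : List (Int × Int)) (updateList : List (List Int)) : Decidable (Pre_part1part2 ruleList updateList) := by unfold Pre_part1part2; infer_instance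

def pvWitness_part1part2 : (List (Int × Int)) × List (List Int) :=
  ([(101, 102), (102, 103), (101, 103)], [[101, 102, 103], [103, 101, 102], [102, 103]])

def Spec_part1part2 (ruleList : List (Int × Int)) (updateList : List (List Int)) (out : Int × Int) : Prop := out = part1part2_alt ruleList updateList
instance (ruleList : List (Int × Int)) (updateList : List (List Int)) (out : Int × Int) : Decidable (Spec_part1part2 ruleList updateList out) := by unfold Spec_part1part2; infer_instance

-- ===== CLAIM (what is proved, stated in full; the proofs are below) =====
def Claim_equal_part1part2 : Prop := ∀ (ruleList : List (Int × Int)) (updateList : List (List Int)), Dom_part1part2 ruleList updateList → Pre_part1part2 ruleList updateList → Spec_part1part2 ruleList updateList (part1part2 ruleList updateList)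

-- ===== LEMMAS AND PROOFS =====

lemma pvGetDLen (A t : List Int) (x : Int) : (A ++ x :: t).getD A.length 0 = x := by
  induction A with
  | nil => rfl
  | cons h tl ih => simpa using ih

lemma pvSetLen (A t : List Int) (x v : Int) : (A ++ x :: t).set A.length v = A ++ v :: t := by
  induction A with
  | nil => rfl
  | cons h tl ih => simpa using ih

-- number of inverted pairs of an update under the rules
def pvInv (rl : List (Int × Int)) : List Int → Nat
  | [] => 0
  | x :: xs => xs.countP (fun y => decide ((y, x) ∈ rl)) + pvInv rl xs

lemma pvInv_append (rl : List (Int × Int)) (xs ys : List Int) :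
    pvInv rl (xs ++ ys) =
      pvInv rl xs + pvInv rl ys +
        (xs.map (fun x => ys.countP (fun y => decide ((y, x) ∈ rl)))).sum := by
  induction xs with
  | nil => simp [pvInv]
  | cons x xs ih => simp [pvInv, List.countP_append, ih]; omega

lemma pvPosFold_get? (u : List Int) :
    ∀ (s : Int) (d : PySem.Dict Int Int) (x : Int),
      ((PySem.List.enumerate u s).foldl
          (fun d p => if d.contains p.2 then d else d.insert p.2 p.1) d).get? x
        = if d.contains x then d.get? x
          else (PySem.List.index? u x).map (fun k => s + (k : Int)) := by
  induction u with
  | nil =>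
      intro s d x
      simp only [PySem.List.enumerate_nil, List.foldl_nil, PySem.List.index?_eq_idxOf?,
        List.idxOf?_nil, Option.map_none]
      by_cases h : d.contains x = true
      · simp [h]
      · simp [Bool.not_eq_true] at h
        simp [h, (PySem.Dict.get?_eq_none_iff_contains d x).mpr h]
  | cons a u ih =>
      intro s d x
      rw [PySem.List.enumerate_cons]
      simp only [List.foldl_cons]
      rw [ih (s + 1) (if d.contains a then d else d.insert a (s, a).1) x]
      by_cases hda : d.contains a = true
      · simp only [hda, if_pos rfl]
        by_cases hdx : d.contains x = true
        · simp [hdx]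
        · simp only [Bool.not_eq_true] at hdx
          have hxa : x ≠ a := fun h => by rw [h] at hdx; rw [hdx] at hda; cases hda
          simp only [hdx, Bool.false_eq_true, if_false]
          rw [PySem.List.index?_cons_of_ne u (fun h => hxa h.symm)]
          cases hix : PySem.List.index? u x
          · simp [hdx]
          · simp [hdx]
            omega
      · simp only [Bool.not_eq_true] at hda
        simp only [hda, Bool.false_eq_true, if_false]
        by_cases hxa : x = a
        · subst hxa
          have h1 : (d.insert x (s, x).1).contains x = true := by
            rw [PySem.Dict.contains_insert]; simp
          simp only [h1, if_pos rfl, hda, Bool.false_eq_true, if_false]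
          rw [PySem.Dict.get?_insert_self, PySem.List.index?_cons_self]
          simp
        · have h1 : (d.insert a (s, a).1).contains x = d.contains x := by
            rw [PySem.Dict.contains_insert]
            simp [hxa]
          have h2 : (d.insert a (s, a).1).get? x = d.get? x :=
            PySem.Dict.get?_insert_of_ne d _ hxa
          rw [h1, h2]
          by_cases hdx : d.contains x = true
          · simp [hdx]
          · simp only [Bool.not_eq_true] at hdx
            simp only [hdx, Bool.false_eq_true, if_false]
            rw [PySem.List.index?_cons_of_ne u (fun h => hxa h.symm)]
            cases hix : PySem.List.index? u x
            · simp [hdx]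
            · simp [hdx]
              omega

lemma pvPos_get? (u : List Int) (x : Int) :
    (pvPosDict u).get? x = (PySem.List.index? u x).map (fun k => (k : Int)) := by
  rw [pvPosDict, pvPosFold_get? u 0 PySem.Dict.empty x]
  simp [PySem.Dict.contains_empty]

lemma pvPos_contains (u : List Int) (x : Int) :
    (pvPosDict u).contains x = decide (x ∈ u) := by
  rw [PySem.Dict.contains_eq_isSome_get?, pvPos_get?]
  cases hix : PySem.List.index? u x
  · have : x ∉ u := (PySem.List.index?_eq_none_iff u x).mp hix
    simp [this]
  · have : x ∈ u := by
      have := (PySem.List.index?_isSome_iff u x).mp (by rw [hix]; rfl)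
      exact this
    simp [this]

lemma pvPos_getD (u : List Int) (x : Int) (k : Nat)
    (h : PySem.List.index? u x = some k) : (pvPosDict u).getD x 0 = (k : Int) := by
  rw [PySem.Dict.getD_eq_get?_getD, pvPos_get?, h]
  rfl

lemma pvFindViol_none_iff (rl : List (Int × Int)) (u : List Int) :
    pvFindViol u rl = none ↔ pvOrdered rl u := by
  induction rl with
  | nil => simp [pvFindViol, pvOrdered]
  | cons r rest ih =>
      rw [show pvOrdered (r :: rest) u ↔ _ ∧ pvOrdered rest u from List.forall_mem_cons]
      cases hx : PySem.List.index? u r.1 <;> cases hy : PySem.List.index? u r.2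
      · have h1 : r.1 ∉ u := (PySem.List.index?_eq_none_iff u r.1).mp hx
        simp only [pvFindViol, hx, hy, ih]
        simp [h1]
      · have h1 : r.1 ∉ u := (PySem.List.index?_eq_none_iff u r.1).mp hx
        simp only [pvFindViol, hx, hy, ih]
        simp [h1]
      · have h2 : r.2 ∉ u := (PySem.List.index?_eq_none_iff u r.2).mp hy
        simp only [pvFindViol, hx, hy, ih]
        simp [h2]
      · rename_i iL iR
        have h1 : r.1 ∈ u := (PySem.List.index?_isSome_iff u r.1).mp (by rw [hx]; rfl)
        have h2 : r.2 ∈ u := (PySem.List.index?_isSome_iff u r.2).mp (by rw [hy]; rfl)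
        simp only [pvFindViol, hx, hy]
        by_cases hlt : iR < iL
        · rw [if_pos hlt]
          constructor
          · intro h; cases h
          · rintro ⟨hP, -⟩
            have := hP h1 h2
            simp at this
            exact absurd this (by omega)
        · rw [if_neg hlt, ih]
          constructor
          · intro h
            refine ⟨fun _ _ => ?_, h⟩
            simp
            omega
          · exact fun h => h.2

lemma pvOrderedB_iff (rl : List (Int × Int)) (u : List Int) :
    pvOrderedB rl (pvPosDict u) = true ↔ pvOrdered rl u := by
  rw [pvOrderedB, List.all_eq_true]
  refine forall_congr' fun r => forall_congr' fun _ => ?_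
  rw [pvPos_contains, pvPos_contains]
  by_cases h1 : r.1 ∈ u
  · by_cases h2 : r.2 ∈ u
    · obtain ⟨k1, hk1⟩ := Option.isSome_iff_exists.mp ((PySem.List.index?_isSome_iff u r.1).mpr h1)
      obtain ⟨k2, hk2⟩ := Option.isSome_iff_exists.mp ((PySem.List.index?_isSome_iff u r.2).mpr h2)
      rw [pvPos_getD u r.1 k1 hk1, pvPos_getD u r.2 k2 hk2]
      rw [PySem.List.index?_eq_idxOf?] at hk1 hk2
      simp [h1, h2, hk1, hk2]
    · simp [h1, h2]
  · simp [h1]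

lemma pvFindViol_some_decomp {rl : List (Int × Int)} {u : List Int} {iL iR : Nat}
    (h : pvFindViol u rl = some (iL, iR)) :
    ∃ a b A M C, (a, b) ∈ rl ∧ u = A ++ (b :: (M ++ (a :: C))) ∧
      A.length = iR ∧ iL = A.length + 1 + M.length := by
  induction rl with
  | nil => simp [pvFindViol] at h
  | cons r rest ih =>
      rw [pvFindViol] at h
      cases hx : PySem.List.index? u r.1 <;> cases hy : PySem.List.index? u r.2 <;>
        rw [hx, hy] at h
      · obtain ⟨a,b,A,M,C,h1,h2,h3,h4⟩ := ih h
        exact ⟨a,b,A,M,C, List.mem_cons_of_mem r h1, h2, h3, h4⟩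
      · obtain ⟨a,b,A,M,C,h1,h2,h3,h4⟩ := ih h
        exact ⟨a,b,A,M,C, List.mem_cons_of_mem r h1, h2, h3, h4⟩
      · obtain ⟨a,b,A,M,C,h1,h2,h3,h4⟩ := ih h
        exact ⟨a,b,A,M,C, List.mem_cons_of_mem r h1, h2, h3, h4⟩
      · rename_i iL' iR'
        dsimp only at h
        by_cases hlt : iR' < iL'
        · rw [if_pos hlt] at h
          injection h with h'
          rw [Prod.mk.injEq] at h'
          obtain ⟨rfl, rfl⟩ := h'
          obtain ⟨A, suf, huA, hA, hbA⟩ := (PySem.List.index?_eq_some_iff u r.2 iR').mp hy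
          obtain ⟨P, S, huP, hP, haP⟩ := (PySem.List.index?_eq_some_iff u r.1 iL').mp hx
          set m := iL' - iR' - 1 with hm
          have hPe : P = A ++ r.2 :: suf.take m := by
            have t1 : (A ++ r.2 :: suf).take iL' = (P ++ r.1 :: S).take iL' := by
              rw [← huA, ← huP]
            rw [List.take_left' hP] at t1
            have e1 : iL' = A.length + (m + 1) := by omega
            rw [e1, List.take_append, List.take_of_length_le (by omega),
              Nat.add_sub_cancel_left, List.take_succ_cons] at t1
            exact t1.symm
          have hMlen : (suf.take m).length = m := by
            have h5 := hP
            rw [hPe] at h5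
            simp only [List.length_append, List.length_cons, List.length_take] at h5
            rw [List.length_take]
            omega
          refine ⟨r.1, r.2, A, suf.take m, S, by simp, ?_, hA, by omega⟩
          rw [huP, hPe]
          simp
        · rw [if_neg hlt] at h
          obtain ⟨a,b,A,M,C,h1,h2,h3,h4⟩ := ih h
          exact ⟨a,b,A,M,C, List.mem_cons_of_mem r h1, h2, h3, h4⟩

lemma pvSwap_eq (A M C : List Int) (a b : Int) :
    pvSwap (A ++ (b :: (M ++ (a :: C)))) (A.length + 1 + M.length) A.length =
      A ++ (a :: (M ++ (b :: C))) := by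
  have assoc : A ++ (b :: (M ++ (a :: C))) = (A ++ b :: M) ++ (a :: C) := by simp
  have e : (A ++ b :: M).length = A.length + 1 + M.length := by
    simp only [List.length_append, List.length_cons]; omega
  have hR : (A ++ (b :: (M ++ (a :: C)))).getD A.length 0 = b := pvGetDLen A _ b
  have hL : (A ++ (b :: (M ++ (a :: C)))).getD (A.length + 1 + M.length) 0 = a := by
    rw [assoc, ← e]; exact pvGetDLen (A ++ b :: M) C a
  have inner : (A ++ (b :: (M ++ (a :: C)))).set (A.length + 1 + M.length) b
      = A ++ (b :: (M ++ (b :: C))) := by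
    rw [assoc, ← e, pvSetLen (A ++ b :: M) C a b]; simp
  have outer : (A ++ (b :: (M ++ (b :: C)))).set A.length a = A ++ (a :: (M ++ (b :: C))) :=
    pvSetLen A _ b a
  simp only [pvSwap]
  rw [hR, hL, inner, outer]

lemma pvSwap_perm (A M C : List Int) (a b : Int) :
    (A ++ (a :: (M ++ (b :: C)))).Perm (A ++ (b :: (M ++ (a :: C)))) := by
  have p1 : (M ++ b :: C).Perm (b :: (M ++ C)) := List.perm_middle
  have p2 : (M ++ a :: C).Perm (a :: (M ++ C)) := List.perm_middle
  exact List.Perm.append_left A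
    (((p1.cons a).trans (List.Perm.swap b a (M ++ C))).trans (p2.cons b).symm)

lemma pvSTO_perm {rl : List (Int × Int)} {u v : List Int} (h : u.Perm v)
    (hs : pvSTO rl u) : pvSTO rl v := by
  obtain ⟨hnd, hirr, htot, hasym, htrans⟩ := hs
  refine ⟨h.nodup_iff.mp hnd, ?_, ?_, ?_, ?_⟩
  · intro x hx; exact hirr x (h.symm.subset hx)
  · intro x hx y hy; exact htot x (h.symm.subset hx) y (h.symm.subset hy)
  · intro x hx y hy; exact hasym x (h.symm.subset hx) y (h.symm.subset hy)
  · intro x hx y hy z hz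
    exact htrans x (h.symm.subset hx) y (h.symm.subset hy) z (h.symm.subset hz)

lemma pvInv_swap_core {rl : List (Int × Int)} {U : List Int}
    (hirr : ∀ x ∈ U, (x, x) ∉ rl)
    (htot : ∀ x ∈ U, ∀ y ∈ U, x ≠ y → (x, y) ∈ rl ∨ (y, x) ∈ rl)
    (hasym : ∀ x ∈ U, ∀ y ∈ U, (x, y) ∈ rl → (y, x) ∉ rl)
    (htrans : ∀ x ∈ U, ∀ y ∈ U, ∀ z ∈ U, (x, y) ∈ rl → (y, z) ∈ rl → (x, z) ∈ rl)
    (a b : Int) (ha : a ∈ U) (hb : b ∈ U) (hab : (a, b) ∈ rl) (C : List Int) :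
    ∀ M : List Int, (∀ m ∈ M, m ∈ U ∧ m ≠ a ∧ m ≠ b) →
      pvInv rl (a :: (M ++ (b :: C))) < pvInv rl (b :: (M ++ (a :: C))) := by
  have hba : (b, a) ∉ rl := hasym a ha b hb hab
  intro M
  induction M with
  | nil =>
      intro _
      simp only [List.nil_append, pvInv, List.countP_cons]
      simp [hab, hba]
      omega
  | cons m M' ihM =>
      intro hM
      obtain ⟨hmU, hma, hmb⟩ := hM m (by simp)
      have ihh := ihM (fun x hx => hM x (by simp [hx]))
      simp only [pvInv, List.cons_append, List.countP_cons, List.countP_append] at ihh ⊢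
      have key : (if decide ((m, a) ∈ rl) = true then 1 else 0) +
          (if decide ((b, m) ∈ rl) = true then 1 else 0) ≤
          (if decide ((m, b) ∈ rl) = true then 1 else 0) +
          (if decide ((a, m) ∈ rl) = true then 1 else 0) := by
        rcases htot m hmU a ha hma with hmlt | hmgt
        · have hmbr : (m, b) ∈ rl := htrans m hmU a ha b hb hmlt hab
          have hbm : (b, m) ∉ rl := hasym m hmU b hb hmbr
          simp [hmlt, hmbr, hbm]
        · have hmar : (m, a) ∉ rl := hasym a ha m hmU hmgt
          by_cases h1 : (b, m) ∈ rl <;> by_cases h2 : (m, b) ∈ rl <;>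
            simp [hmgt, hmar, h1, h2]
      omega

lemma pvInv_swap_lt {rl : List (Int × Int)} {U : List Int} (A M C : List Int) (a b : Int)
    (hsto : pvSTO rl U) (hperm : (A ++ (b :: (M ++ (a :: C)))).Perm U) (hab : (a, b) ∈ rl) :
    pvInv rl (A ++ (a :: (M ++ (b :: C)))) < pvInv rl (A ++ (b :: (M ++ (a :: C)))) := by
  obtain ⟨hnd, hirr, htot, hasym, htrans⟩ := hsto
  have hndL : (A ++ (b :: (M ++ (a :: C)))).Nodup := hperm.nodup_iff.mpr hnd
  have hsub : ∀ x ∈ A ++ (b :: (M ++ (a :: C))), x ∈ U := fun x hx => hperm.subset hx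
  have ha : a ∈ U := hsub a (by simp)
  have hb : b ∈ U := hsub b (by simp)
  have hperm' : (a :: (M ++ (b :: C))).Perm (b :: (M ++ (a :: C))) := by
    have p1 : (M ++ b :: C).Perm (b :: (M ++ C)) := List.perm_middle
    have p2 : (M ++ a :: C).Perm (a :: (M ++ C)) := List.perm_middle
    exact ((p1.cons a).trans (List.Perm.swap b a (M ++ C))).trans (p2.cons b).symm
  rw [pvInv_append rl A, pvInv_append rl A]
  have hcross : (A.map (fun x => (a :: (M ++ (b :: C))).countP (fun y => decide ((y, x) ∈ rl)))).sum
      = (A.map (fun x => (b :: (M ++ (a :: C))).countP (fun y => decide ((y, x) ∈ rl)))).sum := by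
    congr 1
    exact List.map_congr_left (fun x _ => hperm'.countP_eq _)
  rw [hcross]
  have h2 : (b :: (M ++ (a :: C))).Nodup := (List.nodup_append.mp hndL).2.1
  have hbM : b ∉ M ++ (a :: C) := (List.nodup_cons.mp h2).1
  have h3 : (M ++ (a :: C)).Nodup := (List.nodup_cons.mp h2).2
  have hMU : ∀ m ∈ M, m ∈ U ∧ m ≠ a ∧ m ≠ b := by
    intro m hm
    refine ⟨hsub m (by simp [hm]), ?_, ?_⟩
    · intro h
      exact List.disjoint_of_nodup_append h3 hm (by simp [h])
    · intro h
      exact hbM (List.mem_append_left _ (h ▸ hm))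
  have := pvInv_swap_core hirr htot hasym htrans a b ha hb hab C M hMU
  omega

lemma pvInv_le_sq (rl : List (Int × Int)) (u : List Int) :
    pvInv rl u ≤ u.length * u.length := by
  induction u with
  | nil => simp [pvInv]
  | cons x xs ih =>
      have h1 := List.countP_le_length (p := fun y => decide ((y, x) ∈ rl)) (l := xs)
      simp only [pvInv, List.length_cons]
      have : (xs.length + 1) * (xs.length + 1) = xs.length * xs.length + xs.length + xs.length + 1 := by ring
      omega

lemma pvFixLoop_spec (rl : List (Int × Int)) :
    ∀ (f : Nat) (u : List Int), pvSTO rl u → pvInv rl u < f →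
      (pvFixLoop rl f u).Perm u ∧ pvFindViol (pvFixLoop rl f u) rl = none := by
  intro f
  induction f with
  | zero => intro u _ h; omega
  | succ f ih =>
      intro u hsto hlt
      cases hfv : pvFindViol u rl with
      | none => simp [pvFixLoop, hfv]
      | some v =>
          obtain ⟨iL, iR⟩ := v
          obtain ⟨a, b, A, M, C, hab, hu, hAl, hiL⟩ := pvFindViol_some_decomp hfv
          have hswap : pvSwap u iL iR = A ++ (a :: (M ++ (b :: C))) := by
            rw [hu, ← hAl, hiL]
            exact pvSwap_eq A M C a b
          have hperm : (pvSwap u iL iR).Perm u := by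
            rw [hswap, hu]
            exact pvSwap_perm A M C a b
          have hsto' : pvSTO rl (pvSwap u iL iR) := pvSTO_perm hperm.symm hsto
          have hdec : pvInv rl (pvSwap u iL iR) < pvInv rl u := by
            rw [hswap]
            conv_rhs => rw [hu]
            exact pvInv_swap_lt A M C a b hsto (hu ▸ List.Perm.refl u) hab
          obtain ⟨p, hnone⟩ := ih (pvSwap u iL iR) hsto' (by omega)
          rw [show pvFixLoop rl (f + 1) u = pvFixLoop rl f (pvSwap u iL iR) by
            rw [pvFixLoop, hfv]]
          exact ⟨p.trans hperm, hnone⟩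

lemma pvIndex?_getElem {v : List Int} (hnd : v.Nodup) (j : Nat) (hj : j < v.length) :
    PySem.List.index? v v[j] = some j := by
  rw [PySem.List.index?_eq_idxOf?, List.idxOf?_eq_some_iff]
  exact ⟨hj, rfl, fun k hk h => by have := hnd.getElem_inj_iff.mp h; omega⟩

lemma pvPairwise_of_none {rl : List (Int × Int)} {u v : List Int}
    (hsto : pvSTO rl u) (hperm : v.Perm u) (hnone : pvFindViol v rl = none) :
    v.Pairwise (fun x y => (x, y) ∈ rl) := by
  obtain ⟨hnd, hirr, htot, hasym, htrans⟩ := hsto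
  have hvnd : v.Nodup := hperm.nodup_iff.mpr hnd
  rw [List.pairwise_iff_getElem]
  intro i j hi hj hij
  by_contra hxy
  have hx : v[i] ∈ u := hperm.subset (List.getElem_mem hi)
  have hy : v[j] ∈ u := hperm.subset (List.getElem_mem hj)
  have hne : v[i] ≠ v[j] := fun h => by
    have := hvnd.getElem_inj_iff.mp h
    omega
  have hyx : (v[j], v[i]) ∈ rl := (htot _ hx _ hy hne).resolve_left hxy
  have hord := (pvFindViol_none_iff rl v).mp hnone (v[j], v[i]) hyx
    (List.getElem_mem hj) (List.getElem_mem hi)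
  have e1 : PySem.List.index? v v[j] = some j := pvIndex?_getElem hvnd j hj
  have e2 : PySem.List.index? v v[i] = some i := pvIndex?_getElem hvnd i hi
  rw [e1, e2] at hord
  simp at hord
  omega

lemma pvRank_eq {rl : List (Int × Int)} {u v : List Int}
    (hsto : pvSTO rl u) (hperm : v.Perm u)
    (hpw : v.Pairwise (fun x y => (x, y) ∈ rl)) (k : Nat) (hk : k < v.length) :
    v.countP (fun y => decide ((y, v[k]) ∈ rl)) = k := by
  obtain ⟨hnd, hirr, htot, hasym, htrans⟩ := hsto
  have hvk : v[k] ∈ u := hperm.subset (List.getElem_mem hk)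
  have hsplit : v = v.take k ++ v[k] :: v.drop (k + 1) := by
    conv_lhs => rw [← List.take_append_drop k v]
    rw [List.drop_eq_getElem_cons hk]
  rw [congrArg (List.countP (fun y => decide ((y, v[k]) ∈ rl))) hsplit]
  have hpw2 : (v.take k ++ v[k] :: v.drop (k + 1)).Pairwise (fun x y => (x, y) ∈ rl) := by
    rw [← hsplit]; exact hpw
  obtain ⟨hpwT, hpwD, hcross⟩ := List.pairwise_append.mp hpw2
  rw [List.countP_append, List.countP_cons]
  have c1 : (v.take k).countP (fun y => decide ((y, v[k]) ∈ rl)) = (v.take k).length := by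
    rw [List.countP_eq_length]
    intro x hx
    simp only [decide_eq_true_eq]
    exact hcross x hx v[k] (by exact List.mem_cons_self ..)
  have c2 : (v.drop (k + 1)).countP (fun y => decide ((y, v[k]) ∈ rl)) = 0 := by
    rw [List.countP_eq_zero]
    intro z hz
    simp only [decide_eq_true_eq]
    have hz2 : z ∈ u := hperm.subset (hsplit ▸ List.mem_append_right _ (List.mem_cons_of_mem _ hz))
    exact hasym _ hvk _ hz2 ((List.pairwise_cons.mp hpwD).1 z hz)
  rw [c1, c2, List.length_take]
  simp [hirr _ hvk]
  omega

lemma pvLen_pos (u : List Int) (hu : u ≠ []) : 1 ≤ u.length := by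
  cases u with
  | nil => cases hu rfl
  | cons a l => simp

lemma pvMidA_eq (u : List Int) (hu : u ≠ []) :
    pvMidA u = u.getD ((u.length - 1) / 2) 0 := by
  have hn : 1 ≤ u.length := pvLen_pos u hu
  have h1 : ((u.length : Int) - 1) = (((u.length - 1 : Nat)) : Int) := by omega
  have h2 : PySem.Int.truncdiv (((u.length - 1 : Nat)) : Int) 2
      = (((u.length - 1) / 2 : Nat) : Int) := rfl
  rw [pvMidA, h1, h2, PySem.List.pyGetD_natCast]

lemma pvMidI_eq (u : List Int) (hu : u ≠ []) :
    PySem.Int.floordiv ((u.length : Int) - 1) 2 = (((u.length - 1) / 2 : Nat) : Int) := by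
  have hn : 1 ≤ u.length := pvLen_pos u hu
  have h1 : ((u.length : Int) - 1) = (((u.length - 1 : Nat)) : Int) := by omega
  rw [h1]
  exact_mod_cast PySem.Int.floordiv_natCast (u.length - 1) 2

lemma pvMidB_eq (u : List Int) (hu : u ≠ []) :
    PySem.List.pyGetD u (PySem.Int.floordiv ((u.length : Int) - 1) 2) 0
      = u.getD ((u.length - 1) / 2) 0 := by
  rw [pvMidI_eq u hu, PySem.List.pyGetD_natCast]

lemma pvRankPick_spec (rules : PySem.Set (Int × Int)) (u : List Int) (midI t : Int) :
    ∀ (l : List Int) (s2 : Int), t ∈ l →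
      (∀ x ∈ l, (((u.countP (fun y => PySem.Set.contains rules (y, x))) : Int) = midI ↔ x = t)) →
      pvRankPick rules u midI l s2 = s2 + t := by
  intro l
  induction l with
  | nil => intro s2 ht; cases ht
  | cons x rest ih =>
      intro s2 ht hiff
      rw [pvRankPick]
      by_cases hx : ((u.countP (fun y => PySem.Set.contains rules (y, x))) : Int) = midI
      · rw [if_pos hx, (hiff x (by simp)).mp hx]
      · rw [if_neg hx]
        have htr : t ∈ rest := by
          cases List.mem_cons.mp ht with
          | inl h => exact absurd ((hiff x (by simp)).mpr h.symm) hx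
          | inr h => exact h
        exact ih s2 htr (fun y hy => hiff y (by simp [hy]))

lemma pvStep_eq (rl : List (Int × Int)) (u : List Int) (hu : u ≠ [])
    (hd : pvOrdered rl u ∨ pvSTO rl u) (acc : Int × Int) :
    (match pvFindViol u rl with
     | none => (acc.1 + pvMidA u, acc.2)
     | some _ =>
       let fixed := pvFixLoop rl (u.length * u.length + 1) u
       (acc.1, acc.2 + pvMidA fixed)) =
    (let pos := pvPosDict u
     let mid : Int := PySem.Int.floordiv ((u.length : Int) - 1) 2
     if pvOrderedB rl pos then
       (acc.1 + PySem.List.pyGetD u mid 0, acc.2)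
     else
       (acc.1, pvRankPick (PySem.Set.ofList rl) u mid u acc.2)) := by
  have hn : 1 ≤ u.length := pvLen_pos u hu
  cases hfv : pvFindViol u rl with
  | none =>
      have hordB : pvOrderedB rl (pvPosDict u) = true :=
        (pvOrderedB_iff rl u).mpr ((pvFindViol_none_iff rl u).mp hfv)
      simp only [hordB, if_pos rfl, pvMidA_eq u hu, pvMidB_eq u hu]
      simp
  | some w =>
      have hnotord : ¬ pvOrdered rl u := fun ho => by
        rw [(pvFindViol_none_iff rl u).mpr ho] at hfv; cases hfv
      have hordB : pvOrderedB rl (pvPosDict u) = false :=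
        Bool.eq_false_iff.mpr (fun h => hnotord ((pvOrderedB_iff rl u).mp h))
      have hsto : pvSTO rl u := hd.resolve_left hnotord
      obtain ⟨hperm, hnone⟩ := pvFixLoop_spec rl (u.length * u.length + 1) u hsto
        (by have := pvInv_le_sq rl u; omega)
      set F := pvFixLoop rl (u.length * u.length + 1) u with hF
      have hpw := pvPairwise_of_none hsto hperm hnone
      have hlen : F.length = u.length := hperm.length_eq
      have hFnd : F.Nodup := hperm.nodup_iff.mpr hsto.1
      set mid := (u.length - 1) / 2 with hmiddef
      have hmidlt : mid < F.length := by omega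
      have hpick : pvRankPick (PySem.Set.ofList rl) u
          (PySem.Int.floordiv ((u.length : Int) - 1) 2) u acc.2 = acc.2 + F[mid] := by
        apply pvRankPick_spec (PySem.Set.ofList rl) u _ (F[mid]) u acc.2
          (hperm.subset (List.getElem_mem hmidlt))
        intro x hxu
        have hxF : x ∈ F := (hperm.mem_iff).mpr hxu
        obtain ⟨k, hk, hFk⟩ := List.mem_iff_getElem.mp hxF
        have hcnt : u.countP (fun y => PySem.Set.contains (PySem.Set.ofList rl) (y, x))
            = u.countP (fun y => decide ((y, x) ∈ rl)) :=
          List.countP_congr (fun y _ => by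
            rw [PySem.Set.contains_iff]
            simp [PySem.Set.mem_ofList])
        have hcnt2 : u.countP (fun y => decide ((y, x) ∈ rl)) = k := by
          have := pvRank_eq hsto hperm hpw k hk
          rw [hFk] at this
          rw [← hperm.countP_eq]
          exact this
        rw [hcnt, hcnt2, pvMidI_eq u hu]
        constructor
        · intro h
          have hkm : k = mid := by exact_mod_cast h
          subst hkm
          exact hFk.symm
        · intro h
          have : F[k] = F[mid] := by rw [hFk, h]
          have := hFnd.getElem_inj_iff.mp this
          exact_mod_cast congrArg (Nat.cast : Nat → Int) this
      have hmida : pvMidA F = F[mid] := by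
        have hFne : F ≠ [] := by
          intro h
          rw [h] at hlen
          simp at hlen
          omega
        rw [pvMidA_eq F hFne, hlen, ← hmiddef, List.getD_eq_getElem F 0 hmidlt]
      simp only [hordB, Bool.false_eq_true, if_false, hpick, hmida]

lemma pvFold_eq (rl : List (Int × Int)) :
    ∀ (ul : List (List Int)) (acc : Int × Int),
      (∀ u ∈ ul, u ≠ [] ∧ (pvOrdered rl u ∨ pvSTO rl u)) →
      ul.foldl
        (fun acc update =>
          match pvFindViol update rl with
          | none => (acc.1 + pvMidA update, acc.2)
          | some _ =>
            let fixed := pvFixLoop rl (update.length * update.length + 1) update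
            (acc.1, acc.2 + pvMidA fixed)) acc =
      ul.foldl
        (fun acc update =>
          let pos := pvPosDict update
          let mid : Int := PySem.Int.floordiv ((update.length : Int) - 1) 2
          if pvOrderedB rl pos then
            (acc.1 + PySem.List.pyGetD update mid 0, acc.2)
          else
            (acc.1, pvRankPick (PySem.Set.ofList rl) update mid update acc.2)) acc := by
  intro ul
  induction ul with
  | nil => intro acc _; rfl
  | cons u us ih =>
      intro acc hpre
      have hu := hpre u (by simp)
      simp only [List.foldl_cons]
      rw [pvStep_eq rl u hu.1 hu.2 acc]
      exact ih _ (fun v hv => hpre v (by simp [hv]))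

-- ===== VERDICT (by name: the statement is the Claim_ definition above) =====
theorem part1part2_spec : Claim_equal_part1part2 := by
  intro rl ul _ hpre
  unfold Spec_part1part2 part1part2 part1part2_alt
  exact pvFold_eq rl ul (0, 0) hpre
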